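-- pv_equiv track=rewrite | github.com/zekerdoodle/SecondBrain | interface/server/mcp_tools/bash/bash.py | _filter_env
-- ===== SOURCE A (Python) =====
-- from typing import Any, Dict, List, Optional, Tuple
--
-- ENV_ALLOWLIST_PATTERNS = [
--     "PATH",
--     "HOME",
--     "USER",
--     "SHELL",
--     "LANG",
--     "LC_*",
--     "PYTHON*",
--     "VIRTUAL_ENV",
--     "NODE_*",
--     "NPM_*",
--     "DEBIAN_FRONTEND",
--     "SECOND_BRAIN_*",
--     "TERM",
--     "COLORTERM",
--     "DISPLAY",
--     "XDG_*",
--     "EDITOR",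
--     "VISUAL",
--     "PAGER",
--     "TZ",
-- ]
--
-- def _env_matches_pattern(key: str, pattern: str) -> bool:
--     """Check if environment variable key matches a pattern."""
--     if pattern.endswith("*"):
--         return key.startswith(pattern[:-1])
--     return key == pattern
--
-- def _filter_env(env: Dict[str, str]) -> Dict[str, str]:
--     """Filter environment variables by allowlist."""
--     filtered = {}
--     for key, value in env.items():
--         for pattern in ENV_ALLOWLIST_PATTERNS:
--             if _env_matches_pattern(key, pattern):
--                 filtered[key] = value
--                 break
--     return filtered
-- ===== SOURCE B (Python) =====
-- ENV_ALLOWLIST_PATTERNS = [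
--     "PATH",
--     "HOME",
--     "USER",
--     "SHELL",
--     "LANG",
--     "LC_*",
--     "PYTHON*",
--     "VIRTUAL_ENV",
--     "NODE_*",
--     "NPM_*",
--     "DEBIAN_FRONTEND",
--     "SECOND_BRAIN_*",
--     "TERM",
--     "COLORTERM",
--     "DISPLAY",
--     "XDG_*",
--     "EDITOR",
--     "VISUAL",
--     "PAGER",
--     "TZ",
-- ]
--
-- def _filter_env(env):
--     """Filter environment variables by allowlist (pattern-major: collect the
--     allowed key set by scanning patterns against the env's keys, then keep
--     those keys in one comprehension over env, preserving env order)."""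
--     allowed = set()
--     for pattern in ENV_ALLOWLIST_PATTERNS:
--         if pattern.endswith("*"):
--             prefix = pattern[:-1]
--             allowed.update(k for k in env if k.startswith(prefix))
--         elif pattern in env:
--             allowed.add(pattern)
--     return {k: v for k, v in env.items() if k in allowed}
-- ===== Notes on version B (the rewrite author's own statement) =====
-- stated objective: faster
-- what changed: B inverts the traversal: a pattern-major pass over the allowlist collects the set of env keys each pattern admits (exact patterns by one dict-membership test, wildcard patterns by scanning env keys for the prefix), then one comprehension over env keeps the entries whose key is in that set, replacing A's key-major loop with a per-key inner pattern scan and helper call; the final pass does a set lookup per key.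
import Mathlib
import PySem

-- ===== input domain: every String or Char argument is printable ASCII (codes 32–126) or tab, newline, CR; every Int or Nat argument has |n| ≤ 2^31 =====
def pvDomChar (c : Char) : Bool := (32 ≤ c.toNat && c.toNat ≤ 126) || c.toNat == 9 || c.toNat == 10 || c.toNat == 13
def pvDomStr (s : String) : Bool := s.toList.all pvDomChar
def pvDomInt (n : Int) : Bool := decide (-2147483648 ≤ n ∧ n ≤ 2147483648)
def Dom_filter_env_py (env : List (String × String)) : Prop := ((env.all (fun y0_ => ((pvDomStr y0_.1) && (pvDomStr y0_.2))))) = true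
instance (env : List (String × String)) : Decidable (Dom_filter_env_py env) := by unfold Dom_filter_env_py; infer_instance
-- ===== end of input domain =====

-- B inverts A's loops: a pattern-major pass collects the allowed key set, then one pass over env keeps those keys (alternative decomposition; return order matches because the final pass iterates env).


def ENV_ALLOWLIST_PATTERNS : List String :=
  ["PATH", "HOME", "USER", "SHELL", "LANG", "LC_*", "PYTHON*", "VIRTUAL_ENV",
   "NODE_*", "NPM_*", "DEBIAN_FRONTEND", "SECOND_BRAIN_*", "TERM", "COLORTERM",
   "DISPLAY", "XDG_*", "EDITOR", "VISUAL", "PAGER", "TZ"]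

-- ===== PORT A =====
def env_matches_pattern (key pattern : String) : Bool :=
  if PySem.Str.endswith pattern "*" then
    PySem.Str.startswith key (PySem.Str.slice pattern none (some (-1)))
  else
    key == pattern

-- inner 'for pattern in …: if match: filtered[key] = value; break'
def filterEnvInner (key value : String) (filtered : PySem.Dict String String) :
    List String → PySem.Dict String String
  | [] => filtered
  | p :: ps =>
    if env_matches_pattern key p then filtered.insert key value
    else filterEnvInner key value filtered ps

def filter_env_py (env : List (String × String)) : List (String × String) :=
  (env.foldl (fun filtered kv => filterEnvInner kv.1 kv.2 filtered ENV_ALLOWLIST_PATTERNS)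
    PySem.Dict.empty).items

-- ===== PORT B =====
-- 'for pattern in …: allowed.update(…prefix matches…) / allowed.add(pattern)'
def allowedKeys (env : List (String × String)) : PySem.Set String :=
  ENV_ALLOWLIST_PATTERNS.foldl
    (fun allowed pattern =>
      if PySem.Str.endswith pattern "*" then
        PySem.Set.update allowed
          ((env.filter (fun kv =>
              PySem.Str.startswith kv.1 (PySem.Str.slice pattern none (some (-1))))).map
            (fun kv => kv.1))
      else if env.any (fun kv => kv.1 == pattern) then PySem.Set.add allowed pattern
      else allowed)
    PySem.Set.empty

-- '{k: v for k, v in env.items() if k in allowed}'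
def filter_env_py_alt (env : List (String × String)) : List (String × String) :=
  (env.foldl
    (fun d kv =>
      if PySem.Set.contains (allowedKeys env) kv.1 then d.insert kv.1 kv.2 else d)
    PySem.Dict.empty).items

-- ===== PRECONDITION & SPEC =====
def Spec_filter_env_py (env : List (String × String)) (out : List (String × String)) : Prop := out = filter_env_py_alt env
instance (env : List (String × String)) (out : List (String × String)) : Decidable (Spec_filter_env_py env out) := by unfold Spec_filter_env_py; infer_instance

-- ===== CLAIM =====
def Claim_equal_filter_env_py : Prop := ∀ (env : List (String × String)), Dom_filter_env_py env → Spec_filter_env_py env (filter_env_py env)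

-- ===== LEMMAS AND PROOFS =====

-- A's inner break-loop inserts exactly when some pattern matches.
theorem filterEnvInner_eq (k v : String) (d : PySem.Dict String String) (ps : List String) :
    filterEnvInner k v d ps = if ps.any (env_matches_pattern k) then d.insert k v else d := by
  induction ps with
  | nil => simp [filterEnvInner]
  | cons p ps ih =>
    by_cases h : env_matches_pattern k p
    · simp [filterEnvInner, h]
    · simp [filterEnvInner, h, ih]

-- membership characterization of B's pattern-major fold, for any pattern list and accumulator
theorem mem_allowedFold (env : List (String × String)) (ps : List String)
    (s : PySem.Set String) (k : String) :
    k ∈ ps.foldl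
      (fun allowed pattern =>
        if PySem.Str.endswith pattern "*" then
          PySem.Set.update allowed
            ((env.filter (fun kv =>
                PySem.Str.startswith kv.1 (PySem.Str.slice pattern none (some (-1))))).map
              (fun kv => kv.1))
        else if env.any (fun kv => kv.1 == pattern) then PySem.Set.add allowed pattern
        else allowed) s
    ↔ k ∈ s ∨ ((∃ kv ∈ env, kv.1 = k) ∧ ∃ p ∈ ps, env_matches_pattern k p = true) := by
  induction ps generalizing s with
  | nil => simp
  | cons p ps ih =>
    simp only [List.foldl_cons]
    by_cases he : PySem.Str.endswith p "*" = true
    · rw [if_pos he, ih]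
      simp only [PySem.Set.mem_update, List.mem_map, List.mem_filter]
      constructor
      · rintro ((hs | ⟨kv, ⟨hkv, hst⟩, rfl⟩) | ⟨hk, q, hq, hm⟩)
        · exact Or.inl hs
        · refine Or.inr ⟨⟨kv, hkv, rfl⟩, p, List.mem_cons_self .., ?_⟩
          simp only [env_matches_pattern, if_pos he]; exact hst
        · exact Or.inr ⟨hk, q, List.mem_cons_of_mem _ hq, hm⟩
      · rintro (hs | ⟨⟨kv, hkv, rfl⟩, q, hq, hm⟩)
        · exact Or.inl (Or.inl hs)
        · rcases List.mem_cons.mp hq with rfl | hq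
          · simp only [env_matches_pattern, if_pos he] at hm
            exact Or.inl (Or.inr ⟨kv, ⟨hkv, hm⟩, rfl⟩)
          · exact Or.inr ⟨⟨kv, hkv, rfl⟩, q, hq, hm⟩
    · rw [if_neg he]
      by_cases ha : env.any (fun kv => kv.1 == p) = true
      · rw [if_pos ha, ih]
        simp only [PySem.Set.mem_add]
        constructor
        · rintro ((hs | rfl) | ⟨hk, q, hq, hm⟩)
          · exact Or.inl hs
          · simp only [List.any_eq_true, beq_iff_eq] at ha
            obtain ⟨kv, hkv, hkp⟩ := ha
            refine Or.inr ⟨⟨kv, hkv, hkp⟩, k, List.mem_cons_self .., ?_⟩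
            simp only [env_matches_pattern]
            rw [if_neg he]
            exact beq_self_eq_true k
          · exact Or.inr ⟨hk, q, List.mem_cons_of_mem _ hq, hm⟩
        · rintro (hs | ⟨hk, q, hq, hm⟩)
          · exact Or.inl (Or.inl hs)
          · rcases List.mem_cons.mp hq with rfl | hq
            · simp only [env_matches_pattern, if_neg he, beq_iff_eq] at hm
              exact Or.inl (Or.inr hm)
            · exact Or.inr ⟨hk, q, hq, hm⟩
      · rw [if_neg ha, ih]
        constructor
        · rintro (hs | ⟨hk, q, hq, hm⟩)
          · exact Or.inl hs
          · exact Or.inr ⟨hk, q, List.mem_cons_of_mem _ hq, hm⟩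
        · rintro (hs | ⟨hk, q, hq, hm⟩)
          · exact Or.inl hs
          · rcases List.mem_cons.mp hq with rfl | hq
            · simp only [env_matches_pattern, if_neg he, beq_iff_eq] at hm
              subst hm
              obtain ⟨kv, hkv, rfl⟩ := hk
              exact absurd (List.any_eq_true.mpr ⟨kv, hkv, by simp⟩) ha
            · exact Or.inr ⟨hk, q, hq, hm⟩

-- for a key of env, B's allowed-set membership equals A's 'some pattern matches'
theorem contains_allowedKeys (env : List (String × String)) (kv : String × String)
    (hkv : kv ∈ env) :
    PySem.Set.contains (allowedKeys env) kv.1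
      = ENV_ALLOWLIST_PATTERNS.any (env_matches_pattern kv.1) := by
  rw [Bool.eq_iff_iff, PySem.Set.contains_iff]
  unfold allowedKeys
  rw [mem_allowedFold]
  simp only [List.any_eq_true]
  constructor
  · rintro (hs | ⟨_, h⟩)
    · exact absurd hs (by simp [PySem.Set.empty])
    · exact h
  · intro h; exact Or.inr ⟨⟨kv, hkv, rfl⟩, h⟩

-- ===== VERDICT =====
theorem filter_env_py_spec : Claim_equal_filter_env_py := by
  intro env _
  unfold Spec_filter_env_py filter_env_py filter_env_py_alt
  have h : ∀ (d : PySem.Dict String String), ∀ kv ∈ env,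
      filterEnvInner kv.1 kv.2 d ENV_ALLOWLIST_PATTERNS
        = (if PySem.Set.contains (allowedKeys env) kv.1 then d.insert kv.1 kv.2 else d) := by
    intro d kv hkv
    rw [filterEnvInner_eq, contains_allowedKeys env kv hkv]
  exact congrArg PySem.Dict.items (PySem.List.foldl_congr_mem _ _ _ _ h)
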